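-- pv_equiv track=rewrite | github.com/SUNTRAM-digital/experimiento | markets.py | _clean_market_slug
-- ===== SOURCE A (Python) =====
-- def _clean_market_slug(slug: str) -> str:
--     """
--     Convierte un market slug en event slug eliminando sufijos de outcome.
--     Ej: "btc-up-or-down-5m-1234-up" → "btc-up-or-down-5m-1234"
--         "will-chicago-be-above-90f-yes" → "will-chicago-be-above-90f"
--     """
--     if not slug:
--         return slug
--     low = slug.lower()
--     for suffix in ("-yes", "-no", "-up", "-down"):
--         if low.endswith(suffix):
--             return slug[: -len(suffix)]
--     return slug
-- ===== SOURCE B (Python) =====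
-- def _clean_market_slug(slug: str) -> str:
--     """Strip one trailing outcome suffix by splitting at the last hyphen."""
--     i = slug.rfind("-")
--     if i != -1 and slug[i + 1:].lower() in ("yes", "no", "up", "down"):
--         return slug[:i]
--     return slug
-- ===== Notes on version B (the rewrite author's own statement) =====
-- stated objective: alternative
-- what changed: Replaces A's loop of four case-lowered endswith checks and per-suffix slicing by a single rfind of the last hyphen followed by one membership test of the lowered final segment in the four outcome words.
import Mathlib
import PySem

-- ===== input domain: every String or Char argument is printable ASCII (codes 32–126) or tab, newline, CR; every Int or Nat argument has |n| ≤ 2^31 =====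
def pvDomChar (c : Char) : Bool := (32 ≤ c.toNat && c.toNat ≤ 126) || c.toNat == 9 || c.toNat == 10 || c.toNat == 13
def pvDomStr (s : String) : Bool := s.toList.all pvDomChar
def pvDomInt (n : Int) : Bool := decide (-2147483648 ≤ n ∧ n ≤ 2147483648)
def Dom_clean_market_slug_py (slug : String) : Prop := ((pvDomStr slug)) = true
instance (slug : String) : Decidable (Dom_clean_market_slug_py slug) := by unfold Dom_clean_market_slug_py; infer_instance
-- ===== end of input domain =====

-- B replaces A's loop of four lowercase endswith/slice checks by one rfind of the last hyphen
-- plus a membership test on the lowered final segment (objective: alternative decomposition, same cost).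

-- ===== PORT A =====
-- the 'for suffix in ("-yes", "-no", "-up", "-down"): if low.endswith(suffix): return slug[:-len(suffix)]' loop
def pvSuffixLoop (slug low : String) : List String → String
  | [] => slug
  | suf :: rest =>
      if PySem.Str.endswith low suf then
        PySem.Str.slice slug none (some (-(PySem.Str.len suf)))
      else pvSuffixLoop slug low rest

def clean_market_slug_py (slug : String) : String :=
  if slug = "" then slug
  else pvSuffixLoop slug (PySem.Str.lower slug) ["-yes", "-no", "-up", "-down"]

-- ===== PORT B =====
def clean_market_slug_py_alt (slug : String) : String :=
  let i := PySem.Str.rfind slug "-"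
  if i ≠ -1 ∧
      PySem.Str.lower (PySem.Str.slice slug (some (i + 1)) none) ∈
        (["yes", "no", "up", "down"] : List String) then
    PySem.Str.slice slug none (some i)
  else slug

-- ===== PRECONDITION & SPEC =====
def Spec_clean_market_slug_py (slug : String) (out : String) : Prop := out = clean_market_slug_py_alt slug
instance (slug : String) (out : String) : Decidable (Spec_clean_market_slug_py slug out) := by unfold Spec_clean_market_slug_py; infer_instance

-- ===== CLAIM (what is proved, stated in full; the proofs are below) =====
def Claim_equal_clean_market_slug_py : Prop := ∀ (slug : String), Dom_clean_market_slug_py slug → Spec_clean_market_slug_py slug (clean_market_slug_py slug)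

-- ===== LEMMAS AND PROOFS =====

theorem pvLowerChar_dash {c : Char} (h : PySem.Chars.lowerChar c = '-') : c = '-' := by
  unfold PySem.Chars.lowerChar PySem.Chars.isupper at h
  split_ifs at h with hu
  · exfalso
    have h45 : (Char.ofNat (c.toNat + 32)).toNat = 45 := by rw [h]; rfl
    rw [Char.toNat_ofNat] at h45
    simp only [Bool.and_eq_true, decide_eq_true_eq] at hu
    have h65 : 65 ≤ c.toNat := by
      have := hu.1
      rw [Char.le_def, UInt32.le_iff_toBitVec_le, BitVec.le_def] at this
      exact this
    split_ifs at h45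
    omega
  · exact h

theorem pvGoSpec (s sub : List Char) (n : Nat) :
    (PySem.Chars.rfind.go s sub n = -1 ∧ ∀ i : Nat, i ≤ n → ¬ sub <+: s.drop i) ∨
    (∃ k : Nat, PySem.Chars.rfind.go s sub n = (k : Int) ∧ k ≤ n ∧ sub <+: s.drop k ∧
        ∀ i : Nat, k < i → i ≤ n → ¬ sub <+: s.drop i) := by
  induction n with
  | zero =>
    by_cases h : sub.isPrefixOf s
    · right
      refine ⟨0, ?_, le_refl 0, ?_, ?_⟩
      · simp [PySem.Chars.rfind.go, h]
      · simpa [List.isPrefixOf_iff_prefix] using h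
      · intro i hi hi2; omega
    · left
      constructor
      · simp [PySem.Chars.rfind.go, h]
      · intro i hi
        interval_cases i
        simpa [List.isPrefixOf_iff_prefix] using h
  | succ j ih =>
    have hrec : PySem.Chars.rfind.go s sub (j + 1) =
        if sub.isPrefixOf (s.drop (j + 1)) then ((j : Int) + 1) else PySem.Chars.rfind.go s sub j := by
      rw [PySem.Chars.rfind.go]; simp
    by_cases h : sub.isPrefixOf (s.drop (j + 1))
    · right
      refine ⟨j + 1, by rw [hrec]; simp [h], le_refl _,
        by simpa [List.isPrefixOf_iff_prefix] using h, ?_⟩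
      intro i hi hi2; omega
    · have hnot : ¬ sub <+: s.drop (j + 1) := by
        simpa [List.isPrefixOf_iff_prefix] using h
      rcases ih with ⟨he, hall⟩ | ⟨k, hk, hkle, hkpre, hkmax⟩
      · left
        refine ⟨by rw [hrec]; simp [h, he], ?_⟩
        intro i hi
        rcases Nat.lt_or_ge i (j + 1) with hlt | hge
        · exact hall i (by omega)
        · have : i = j + 1 := by omega
          subst this; exact hnot
      · right
        refine ⟨k, by rw [hrec]; simp [h, hk], by omega, hkpre, ?_⟩
        intro i hi hi2
        rcases Nat.lt_or_ge i (j + 1) with hlt | hge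
        · exact hkmax i hi (by omega)
        · have : i = j + 1 := by omega
          subst this; exact hnot

-- A matched suffix '-'::w of the lowered string pins down the last hyphen and the lowered tail.
theorem pvCaseMatch (cs w : List Char) (hw : '-' ∉ w)
    (h : ('-' :: w) <:+ PySem.Chars.lower cs) :
    ∃ k : Nat, k + (w.length + 1) = cs.length ∧
      PySem.Chars.rfind cs ['-'] = (k : Int) ∧
      PySem.Chars.lower (cs.drop (k + 1)) = w := by
  obtain ⟨p, hp⟩ := h
  have hlen : p.length + (w.length + 1) = cs.length := by
    have h1 := congrArg List.length hp
    simp [PySem.Chars.lower] at h1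
    omega
  have hdropLow : PySem.Chars.lower (cs.drop p.length) = '-' :: w := by
    have h2 : (PySem.Chars.lower cs).drop p.length = '-' :: w := by
      rw [← hp]; exact List.drop_left
    calc PySem.Chars.lower (cs.drop p.length)
        = (PySem.Chars.lower cs).drop p.length := by
          simp [PySem.Chars.lower, List.map_drop]
      _ = '-' :: w := h2
  obtain ⟨d, t, hd⟩ : ∃ d t, cs.drop p.length = d :: t := by
    cases hcs : cs.drop p.length with
    | nil => rw [hcs] at hdropLow; simp [PySem.Chars.lower] at hdropLow
    | cons d t => exact ⟨d, t, rfl⟩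
  rw [hd] at hdropLow
  simp only [PySem.Chars.lower, List.map_cons, List.cons.injEq] at hdropLow
  obtain ⟨hdl, htl⟩ := hdropLow
  have hdd : d = '-' := pvLowerChar_dash hdl
  have hdrop1 : cs.drop (p.length + 1) = t := by
    rw [← List.drop_drop, hd]; rfl
  have hlow1 : PySem.Chars.lower (cs.drop (p.length + 1)) = w := by
    rw [hdrop1]; exact htl
  have hpre : ['-'] <+: cs.drop p.length := by
    rw [hd, hdd]; exact ⟨t, rfl⟩
  have hndash : '-' ∉ t := by
    intro hmem
    apply hw
    rw [← htl]
    have := List.mem_map_of_mem (f := PySem.Chars.lowerChar) hmem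
    rwa [show PySem.Chars.lowerChar '-' = '-' from by decide] at this
  have hrf : PySem.Chars.rfind cs ['-'] = (p.length : Int) := by
    unfold PySem.Chars.rfind
    rcases pvGoSpec cs ['-'] cs.length with ⟨he, hall⟩ | ⟨k', hk', hk'le, hk'pre, hk'max⟩
    · exact absurd hpre (hall p.length (by omega))
    · have hge : p.length ≤ k' := by
        by_contra hlt; push_neg at hlt
        exact hk'max p.length hlt (by omega) hpre
      have hle : k' ≤ p.length := by
        by_contra hlt; push_neg at hlt
        obtain ⟨u, hu⟩ := hk'pre
        have hmem : '-' ∈ cs.drop k' := by rw [← hu]; simp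
        have hsub : cs.drop k' ⊆ t := by
          rw [show cs.drop k' = t.drop (k' - (p.length + 1)) from by
            rw [← hdrop1, List.drop_drop]; congr 1; omega]
          exact List.drop_subset _ _
        exact hndash (hsub hmem)
      have : k' = p.length := le_antisymm hle hge
      subst this
      exact hk'
  exact ⟨p.length, hlen, hrf, hlow1⟩

-- a hyphen at position k with lowered tail w makes the lowered string end with '-'::w
theorem pvNoMatch (cs : List Char) (k : Nat) (t w : List Char)
    (hk : cs.drop k = '-' :: t)
    (hw : PySem.Chars.lower (cs.drop (k + 1)) = w) :
    ('-' :: w) <:+ PySem.Chars.lower cs := by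
  have hdrop1 : cs.drop (k + 1) = t := by
    rw [← List.drop_drop, hk]; rfl
  refine ⟨PySem.Chars.lower (cs.take k), ?_⟩
  conv_rhs => rw [show cs = cs.take k ++ '-' :: t from by
    rw [← hk]; exact (List.take_append_drop k cs).symm]
  rw [← hw, hdrop1]
  simp [PySem.Chars.lower, show PySem.Chars.lowerChar '-' = '-' from by decide]

-- matched-suffix case at String level: B strips exactly A's slice
theorem pvMatchCase (slug suf w : String)
    (hsuf : suf.toList = '-' :: w.toList) (hw : '-' ∉ w.toList)
    (hmem : w ∈ (["yes", "no", "up", "down"] : List String))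
    (h : PySem.Str.endswith (PySem.Str.lower slug) suf = true) :
    clean_market_slug_py_alt slug = PySem.Str.slice slug none (some (-(PySem.Str.len suf))) := by
  have hend : ('-' :: w.toList) <:+ PySem.Chars.lower slug.toList := by
    have h' : PySem.Chars.endswith (PySem.Chars.lower slug.toList) suf.toList = true := by
      simpa using h
    rw [hsuf] at h'
    exact (PySem.Chars.endswith_iff _ _).1 h'
  obtain ⟨k, hlen, hrf, hlow⟩ := pvCaseMatch slug.toList w.toList hw hend
  have hi : PySem.Str.rfind slug "-" = (k : Int) := by
    simpa using hrf
  have htail : PySem.Str.lower (PySem.Str.slice slug (some ((k : Int) + 1)) none) = w := by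
    have h1 : (PySem.Str.slice slug (some ((k : Int) + 1)) none).toList = slug.toList.drop (k + 1) := by
      simp [PySem.Str.slice, PySem.List.slice_from _ (by omega : (0:Int) ≤ (k:Int) + 1)]
    have h2 : (PySem.Str.lower (PySem.Str.slice slug (some ((k : Int) + 1)) none)).toList = w.toList := by
      simp [h1, hlow]
    have h3 := congrArg String.ofList h2
    rwa [String.ofList_toList, String.ofList_toList] at h3
  have hcond : PySem.Str.rfind slug "-" ≠ -1 ∧
      PySem.Str.lower (PySem.Str.slice slug (some (PySem.Str.rfind slug "-" + 1)) none) ∈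
        (["yes", "no", "up", "down"] : List String) := by
    rw [hi]
    exact ⟨by omega, by rw [htail]; exact hmem⟩
  unfold clean_market_slug_py_alt
  simp only []
  rw [if_pos hcond, hi]
  -- both sides are String.ofList of the same take
  have hlenSuf : PySem.Str.len suf = ((w.toList.length + 1 : Nat) : Int) := by
    simp [PySem.Str.len, hsuf]
  rw [hlenSuf]
  unfold PySem.Str.slice
  congr 1
  simp only [PySem.Chars.slice_eq_listSlice]
  rw [PySem.List.slice_to_neg_natCast _ _ (by omega),
      PySem.List.slice_to _ (by omega : (0:Int) ≤ (k:Int))]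
  congr 1
  omega

-- no suffix matches: B leaves the slug unchanged
theorem pvNoCase (slug : String)
    (h1 : ¬ PySem.Str.endswith (PySem.Str.lower slug) "-yes" = true)
    (h2 : ¬ PySem.Str.endswith (PySem.Str.lower slug) "-no" = true)
    (h3 : ¬ PySem.Str.endswith (PySem.Str.lower slug) "-up" = true)
    (h4 : ¬ PySem.Str.endswith (PySem.Str.lower slug) "-down" = true) :
    clean_market_slug_py_alt slug = slug := by
  unfold clean_market_slug_py_alt
  simp only []
  rw [if_neg]
  rintro ⟨hne, hmem⟩
  rcases pvGoSpec slug.toList ['-'] slug.toList.length with ⟨he, _⟩ | ⟨k, hk, _, hkpre, _⟩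
  · exact hne (by simpa [PySem.Chars.rfind] using he)
  · have hi : PySem.Str.rfind slug "-" = (k : Int) := by
      simpa [PySem.Chars.rfind] using hk
    rw [hi] at hmem
    obtain ⟨t, ht⟩ := hkpre
    have hdk : slug.toList.drop k = '-' :: t := ht.symm
    have hgen : ∀ w : String,
        PySem.Str.lower (PySem.Str.slice slug (some ((k : Int) + 1)) none) = w →
        PySem.Str.endswith (PySem.Str.lower slug) (String.ofList ('-' :: w.toList)) = true := by
      intro w hweq
      have h1' : (PySem.Str.slice slug (some ((k : Int) + 1)) none).toList = slug.toList.drop (k + 1) := by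
        simp [PySem.Str.slice, PySem.List.slice_from _ (by omega : (0:Int) ≤ (k:Int) + 1)]
      have hlow : PySem.Chars.lower (slug.toList.drop (k + 1)) = w.toList := by
        have := congrArg String.toList hweq
        simpa [h1'] using this
      have hsfx := pvNoMatch slug.toList k t w.toList hdk hlow
      have : PySem.Chars.endswith (PySem.Chars.lower slug.toList) ('-' :: w.toList) = true :=
        (PySem.Chars.endswith_iff _ _).2 hsfx
      simpa using this
    simp only [List.mem_cons, List.not_mem_nil, or_false] at hmem
    rcases hmem with hw | hw | hw | hw
    · exact h1 (by simpa using hgen "yes" hw)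
    · exact h2 (by simpa using hgen "no" hw)
    · exact h3 (by simpa using hgen "up" hw)
    · exact h4 (by simpa using hgen "down" hw)

-- ===== VERDICT (by name: the statement is the Claim_ definition above) =====
theorem clean_market_slug_py_spec : Claim_equal_clean_market_slug_py := by
  intro slug _
  show clean_market_slug_py slug = clean_market_slug_py_alt slug
  by_cases hempty : slug = ""
  · subst hempty; decide
  · unfold clean_market_slug_py
    rw [if_neg hempty]
    simp only [pvSuffixLoop]
    by_cases h1 : PySem.Str.endswith (PySem.Str.lower slug) "-yes" = true
    · rw [if_pos h1]
      exact (pvMatchCase slug "-yes" "yes" rfl (by decide) (by decide) h1).symm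
    · rw [if_neg h1]
      by_cases h2 : PySem.Str.endswith (PySem.Str.lower slug) "-no" = true
      · rw [if_pos h2]
        exact (pvMatchCase slug "-no" "no" rfl (by decide) (by decide) h2).symm
      · rw [if_neg h2]
        by_cases h3 : PySem.Str.endswith (PySem.Str.lower slug) "-up" = true
        · rw [if_pos h3]
          exact (pvMatchCase slug "-up" "up" rfl (by decide) (by decide) h3).symm
        · rw [if_neg h3]
          by_cases h4 : PySem.Str.endswith (PySem.Str.lower slug) "-down" = true
          · rw [if_pos h4]
            exact (pvMatchCase slug "-down" "down" rfl (by decide) (by decide) h4).symm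
          · rw [if_neg h4]
            exact (pvNoCase slug h1 h2 h3 h4).symm
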